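-- pv_equiv track=rewrite | github.com/adam147g/algorithms-and-data-structures | Laboratory/Graph/Removing vertices leaving a coherent graph.py | delete_vertices
-- ===== SOURCE A (Python) =====
-- from queue import Queue
--
-- def delete_vertices(graph, source=0):
--     queue = Queue()
--     visited = [False] * len(graph)
--     visited[source] = True
--     result = [source]
--     queue.put(source)
--     while not queue.empty():
--         u = queue.get()
--         for v in graph[u]:
--             if not visited[v]:
--                 visited[v] = True
--                 queue.put(v)
--                 result.append(v)
--     result.reverse()
--     return result
-- ===== SOURCE B (Python) =====
-- def delete_vertices(graph, source=0):
--     visited = [False] * len(graph)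
--     visited[source] = True
--     result = [source]
--     frontier = [source]
--     while frontier:
--         next_frontier = []
--         for u in frontier:
--             for v in graph[u]:
--                 if not visited[v]:
--                     visited[v] = True
--                     result.append(v)
--                     next_frontier.append(v)
--         frontier = next_frontier
--     result.reverse()
--     return result
-- ===== Notes on version B (the rewrite author's own statement) =====
-- stated objective: alternative
-- what changed: replaces the single FIFO queue of A with a level-synchronous BFS (outer loop over levels, inner loop over the current frontier building the next one), which preserves the exact discovery order
import Mathlib
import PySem

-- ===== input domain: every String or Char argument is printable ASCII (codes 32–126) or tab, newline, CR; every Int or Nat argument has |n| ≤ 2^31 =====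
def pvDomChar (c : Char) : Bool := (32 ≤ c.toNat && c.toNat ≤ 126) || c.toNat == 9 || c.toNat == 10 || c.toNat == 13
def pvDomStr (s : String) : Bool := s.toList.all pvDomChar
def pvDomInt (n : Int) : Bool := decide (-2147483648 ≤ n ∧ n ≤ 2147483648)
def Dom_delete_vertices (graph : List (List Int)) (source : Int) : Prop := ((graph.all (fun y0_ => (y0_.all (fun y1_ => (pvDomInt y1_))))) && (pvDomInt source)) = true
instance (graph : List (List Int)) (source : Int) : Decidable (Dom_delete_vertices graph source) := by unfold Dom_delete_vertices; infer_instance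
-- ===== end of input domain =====

-- B replaces A's single FIFO queue with a level-synchronous BFS (outer loop over levels,
-- inner loop over the current frontier building the next one); same discovery order, same cost.

-- ===== PORT A =====
-- "for v in graph[u]: if not visited[v]: visited[v]=True; queue.put(v); result.append(v)"
-- state is (visited, queue, result); out-of-range v never occurs under Pre_ (Python raises there).
def dvInnerA (ns : List Int) (vis : List Bool) (q res : List Int) : List Bool × List Int × List Int :=
  ns.foldl (fun st v =>
    match PySem.List.pyGet? st.1 v with
    | some false => (PySem.List.pySetD st.1 v true, st.2.1 ++ [v], st.2.2 ++ [v])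
    | _ => st) (vis, q, res)

-- set j true on a false cell loses exactly one false (termination helper for the loops)
theorem dv_count_set_true (vis : List Bool) (k : Nat) (h : vis[k]? = some false) :
    (vis.set k true).count false + 1 = vis.count false := by
  induction vis generalizing k with
  | nil => simp at h
  | cons b t ih =>
    cases k with
    | zero =>
      simp_all
    | succ k =>
      simp only [List.getElem?_cons_succ] at h
      simp [List.count_cons, ← ih k h]
      omega

theorem dv_measure_step (vis : List Bool) (q res : List Int) (v : Int) :
    (match PySem.List.pyGet? vis v with
      | some false => (PySem.List.pySetD vis v true, q ++ [v], res ++ [v])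
      | _ => (vis, q, res) : List Bool × List Int × List Int).1.count false * 2 +
    (match PySem.List.pyGet? vis v with
      | some false => (PySem.List.pySetD vis v true, q ++ [v], res ++ [v])
      | _ => (vis, q, res) : List Bool × List Int × List Int).2.1.length
      ≤ vis.count false * 2 + q.length := by
  unfold PySem.List.pyGet? PySem.List.pySetD PySem.List.pySet?
  cases hk : PySem.List.pyIdx? vis.length v with
  | none => simp
  | some k =>
    simp only [Option.bind_some, Option.map_some, Option.getD_some]
    cases hg : vis[k]? with
    | none => simp
    | some b =>
      cases b with
      | true => simp
      | false =>
        have := dv_count_set_true vis k hg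
        simp only [List.length_append, List.length_cons, List.length_nil]
        omega

theorem dvInnerA_measure (ns : List Int) (vis : List Bool) (q res : List Int) :
    (dvInnerA ns vis q res).1.count false * 2 + (dvInnerA ns vis q res).2.1.length
      ≤ vis.count false * 2 + q.length := by
  induction ns generalizing vis q res with
  | nil => simp [dvInnerA]
  | cons v ns ih =>
    have h1 := dv_measure_step vis q res v
    simp only [dvInnerA, List.foldl_cons] at *
    cases hg : PySem.List.pyGet? vis v with
    | none => simp only [hg] at *; exact ih vis q res
    | some b =>
      cases b with
      | true => simp only [hg] at *; exact ih vis q res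
      | false =>
        simp only [hg] at h1 ⊢
        exact le_trans (ih _ _ _) h1

-- the while-loop of A: queue processed one vertex at a time, FIFO
def dvLoopA (graph : List (List Int)) : List Int → List Bool → List Int → List Int
  | [], _, res => res
  | u :: rest, vis, res =>
    let t := dvInnerA ((PySem.List.pyGet? graph u).getD []) vis rest res
    dvLoopA graph t.2.1 t.1 t.2.2
termination_by q vis _ => vis.count false * 2 + q.length
decreasing_by
  have := dvInnerA_measure ((PySem.List.pyGet? graph u).getD []) vis rest res
  simp only [List.length_cons]
  omega

def delete_vertices (graph : List (List Int)) (source : Int) : List Int :=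
  (dvLoopA graph [source]
    (PySem.List.pySetD (List.replicate graph.length false) source true)
    [source]).reverse

-- ===== PORT B =====
-- "for v in graph[u]: if not visited[v]: visited[v]=True; result.append(v); next_frontier.append(v)"
-- state is (visited, result, next_frontier)
def dvInnerB (ns : List Int) (vis : List Bool) (res nf : List Int) : List Bool × List Int × List Int :=
  ns.foldl (fun st v =>
    match PySem.List.pyGet? st.1 v with
    | some false => (PySem.List.pySetD st.1 v true, st.2.1 ++ [v], st.2.2 ++ [v])
    | _ => st) (vis, res, nf)

-- "for u in frontier: …" over one whole level
def dvFrontierB (graph : List (List Int)) (f : List Int) (vis : List Bool) (res nf : List Int) :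
    List Bool × List Int × List Int :=
  f.foldl (fun st u => dvInnerB ((PySem.List.pyGet? graph u).getD []) st.1 st.2.1 st.2.2)
    (vis, res, nf)

theorem dvInnerB_measure (ns : List Int) (vis : List Bool) (res nf : List Int) :
    (dvInnerB ns vis res nf).1.count false * 2 + (dvInnerB ns vis res nf).2.2.length
      ≤ vis.count false * 2 + nf.length := by
  induction ns generalizing vis res nf with
  | nil => simp [dvInnerB]
  | cons v ns ih =>
    simp only [dvInnerB, List.foldl_cons] at *
    cases hg : PySem.List.pyGet? vis v with
    | none => exact ih vis res nf
    | some b =>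
      cases b with
      | true => exact ih vis res nf
      | false =>
        refine le_trans (ih _ _ _) ?_
        unfold PySem.List.pyGet? at hg
        unfold PySem.List.pySetD PySem.List.pySet?
        cases hk : PySem.List.pyIdx? vis.length v with
        | none => simp [hk] at hg
        | some k =>
          simp only [hk, Option.bind_some] at hg
          have := dv_count_set_true vis k hg
          simp only [Option.map_some, Option.getD_some, List.length_append, List.length_cons,
            List.length_nil]
          omega

theorem dvFrontierB_measure (graph : List (List Int)) (f : List Int) (vis : List Bool)
    (res nf : List Int) :
    (dvFrontierB graph f vis res nf).1.count false * 2 + (dvFrontierB graph f vis res nf).2.2.length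
      ≤ vis.count false * 2 + nf.length := by
  induction f generalizing vis res nf with
  | nil => simp [dvFrontierB]
  | cons u f ih =>
    simp only [dvFrontierB, List.foldl_cons] at *
    refine le_trans (ih _ _ _) ?_
    exact dvInnerB_measure _ vis res nf

-- the while-loop of B: one iteration per level
def dvLoopB (graph : List (List Int)) : List Int → List Bool → List Int → List Int
  | [], _, res => res
  | u :: fr, vis, res =>
    let t := dvFrontierB graph (u :: fr) vis res []
    dvLoopB graph t.2.2 t.1 t.2.1
termination_by f vis _ => vis.count false * 2 + f.length
decreasing_by
  have := dvFrontierB_measure graph (u :: fr) vis res []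
  simp only [List.length_nil] at this
  simp only [List.length_cons]
  omega

def delete_vertices_alt (graph : List (List Int)) (source : Int) : List Int :=
  (dvLoopB graph [source]
    (PySem.List.pySetD (List.replicate graph.length false) source true)
    [source]).reverse

-- ===== PRECONDITION & SPEC =====
-- helpers for Pre_: the set of (normalized) vertex indices reachable from source through
-- in-range edges, computed as a closure (|V| expansion rounds reach the fixpoint)
def dvReachStep (graph : List (List Int)) (acc : List Nat) : List Nat :=
  acc.foldl (fun a u =>
    (graph[u]?.getD []).foldl (fun a v =>
      match PySem.List.pyIdx? graph.length v with
      | some k => if k ∈ a then a else a ++ [k]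
      | none => a) a) acc

def dvReach (graph : List (List Int)) : Nat → List Nat → List Nat
  | 0, acc => acc
  | n + 1, acc => dvReach graph n (dvReachStep graph acc)

-- Pre_ holds exactly on the inputs where the Python A returns: it fails only when A raises
-- IndexError, i.e. when the source is out of range or some vertex reachable from the source
-- has an out-of-range neighbour (unreachable out-of-range entries stay INSIDE Pre_).
def Pre_delete_vertices (graph : List (List Int)) (source : Int) : Prop :=
  PySem.Raise.InRange graph.length source ∧
  ∀ u ∈ dvReach graph graph.length [(PySem.List.pyIdx? graph.length source).getD 0],
    ∀ v ∈ graph[u]?.getD [], PySem.Raise.InRange graph.length v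
instance (graph : List (List Int)) (source : Int) : Decidable (Pre_delete_vertices graph source) := by
  unfold Pre_delete_vertices; infer_instance

-- witness: vertex 2 has an out-of-range entry 7, but 2 is unreachable from 0, so A returns
def pvWitness_delete_vertices : List (List Int) × Int := ([[1, -2], [0], [7]], 0)

def Spec_delete_vertices (graph : List (List Int)) (source : Int) (out : List Int) : Prop := out = delete_vertices_alt graph source
instance (graph : List (List Int)) (source : Int) (out : List Int) : Decidable (Spec_delete_vertices graph source out) := by unfold Spec_delete_vertices; infer_instance

-- ===== CLAIM (what is proved, stated in full; the proofs are below) =====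
def Claim_equal_delete_vertices : Prop := ∀ (graph : List (List Int)) (source : Int), Dom_delete_vertices graph source → Pre_delete_vertices graph source → Spec_delete_vertices graph source (delete_vertices graph source)

-- ===== LEMMAS AND PROOFS =====

-- one-step equations for the three folds
theorem dvInnerA_cons (v : Int) (ns : List Int) (vis : List Bool) (q res : List Int) :
    dvInnerA (v :: ns) vis q res =
      (match PySem.List.pyGet? vis v with
        | some false => dvInnerA ns (PySem.List.pySetD vis v true) (q ++ [v]) (res ++ [v])
        | _ => dvInnerA ns vis q res) := by
  cases h : PySem.List.pyGet? vis v with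
  | none => simp [dvInnerA, h]
  | some b => cases b <;> simp [dvInnerA, h]

theorem dvInnerB_cons (v : Int) (ns : List Int) (vis : List Bool) (res nf : List Int) :
    dvInnerB (v :: ns) vis res nf =
      (match PySem.List.pyGet? vis v with
        | some false => dvInnerB ns (PySem.List.pySetD vis v true) (res ++ [v]) (nf ++ [v])
        | _ => dvInnerB ns vis res nf) := by
  cases h : PySem.List.pyGet? vis v with
  | none => simp [dvInnerB, h]
  | some b => cases b <;> simp [dvInnerB, h]

theorem dvFrontierB_cons (graph : List (List Int)) (u : Int) (f : List Int) (vis : List Bool)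
    (res nf : List Int) :
    dvFrontierB graph (u :: f) vis res nf =
      dvFrontierB graph f (dvInnerB ((PySem.List.pyGet? graph u).getD []) vis res nf).1
        (dvInnerB ((PySem.List.pyGet? graph u).getD []) vis res nf).2.1
        (dvInnerB ((PySem.List.pyGet? graph u).getD []) vis res nf).2.2 := rfl

-- B's inner fold: the next_frontier accumulator only ever grows at the tail
theorem dvInnerB_shift (ns : List Int) (vis : List Bool) (res nf : List Int) :
    dvInnerB ns vis res nf =
      ((dvInnerB ns vis res []).1, (dvInnerB ns vis res []).2.1,
        nf ++ (dvInnerB ns vis res []).2.2) := by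
  induction ns generalizing vis res nf with
  | nil => simp [dvInnerB]
  | cons v ns ih =>
    rw [dvInnerB_cons, dvInnerB_cons]
    cases hg : PySem.List.pyGet? vis v with
    | none => simpa using ih vis res nf
    | some b =>
      cases b with
      | true => simpa using ih vis res nf
      | false =>
        simp only [List.nil_append]
        rw [ih _ _ (nf ++ [v]), ih _ _ ([v] : List Int)]
        simp

-- A's inner step = B's inner step with the queue tail playing the next_frontier accumulator
theorem dvInnerAB (ns : List Int) (vis : List Bool) (q res : List Int) :
    dvInnerA ns vis q res =
      ((dvInnerB ns vis res []).1, q ++ (dvInnerB ns vis res []).2.2,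
        (dvInnerB ns vis res []).2.1) := by
  induction ns generalizing vis q res with
  | nil => simp [dvInnerA, dvInnerB]
  | cons v ns ih =>
    rw [dvInnerA_cons, dvInnerB_cons]
    cases hg : PySem.List.pyGet? vis v with
    | none => simpa using ih vis q res
    | some b =>
      cases b with
      | true => simpa using ih vis q res
      | false =>
        simp only [List.nil_append]
        rw [ih _ (q ++ [v]) (res ++ [v]), dvInnerB_shift ns _ _ ([v] : List Int)]
        simp

-- B's frontier fold: same shift property for its next_frontier accumulator
theorem dvFrontierB_shift (graph : List (List Int)) (f : List Int) (vis : List Bool)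
    (res nf : List Int) :
    dvFrontierB graph f vis res nf =
      ((dvFrontierB graph f vis res []).1, (dvFrontierB graph f vis res []).2.1,
        nf ++ (dvFrontierB graph f vis res []).2.2) := by
  induction f generalizing vis res nf with
  | nil => simp [dvFrontierB]
  | cons u f ih =>
    rw [dvFrontierB_cons, dvFrontierB_cons, dvInnerB_shift _ _ _ nf]
    dsimp only
    rw [ih _ _ (nf ++ (dvInnerB ((PySem.List.pyGet? graph u).getD []) vis res []).2.2),
        ih _ _ ((dvInnerB ((PySem.List.pyGet? graph u).getD []) vis res []).2.2)]
    simp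

-- KEY: running A's queue loop on (frontier ++ tail) first processes the whole frontier,
-- appending all its discoveries after tail — exactly one level of B.
theorem dvLoopA_level (graph : List (List Int)) (f : List Int) :
    ∀ (tail : List Int) (vis : List Bool) (res : List Int),
    dvLoopA graph (f ++ tail) vis res =
      dvLoopA graph (tail ++ (dvFrontierB graph f vis res []).2.2)
        (dvFrontierB graph f vis res []).1 (dvFrontierB graph f vis res []).2.1 := by
  induction f with
  | nil => intro tail vis res; simp [dvFrontierB]
  | cons u f ih =>
    intro tail vis res
    rw [List.cons_append, dvLoopA]
    rw [dvInnerAB]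
    rw [dvFrontierB_cons, dvFrontierB_shift]
    dsimp only
    have := ih (tail ++ (dvInnerB ((PySem.List.pyGet? graph u).getD []) vis res []).2.2)
      (dvInnerB ((PySem.List.pyGet? graph u).getD []) vis res []).1
      (dvInnerB ((PySem.List.pyGet? graph u).getD []) vis res []).2.1
    simp only [List.append_assoc] at this ⊢
    exact this

theorem dvLoopB_eq_dvLoopA (graph : List (List Int)) (f : List Int) (vis : List Bool)
    (res : List Int) : dvLoopB graph f vis res = dvLoopA graph f vis res := by
  induction f, vis, res using dvLoopB.induct graph with
  | case1 vis res => rw [dvLoopB, dvLoopA]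
  | case2 u fr vis res t ih =>
    rw [dvLoopB]
    rw [ih]
    have := dvLoopA_level graph (u :: fr) [] vis res
    simp only [List.append_nil, List.nil_append] at this
    rw [this]

-- ===== VERDICT (by name: the statement is the Claim_ definition above) =====
theorem delete_vertices_spec : Claim_equal_delete_vertices := by
  intro graph source _ _
  unfold Spec_delete_vertices delete_vertices delete_vertices_alt
  rw [dvLoopB_eq_dvLoopA]
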